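-- pv_equiv track=rewrite | github.com/CunxiangYin/football-migu | backend/agents/football_prediction_writer.py | _summarize_h2h
-- ===== SOURCE A (Python) =====
-- from typing import Dict, List, Optional, Any
--
-- def _summarize_h2h(h2h_results: List[Dict]) -> str:
--     """总结历史交锋"""
--     if not h2h_results:
--         return "双方近期无交锋记录。"
--
--     wins = {"home": 0, "draw": 0, "away": 0}
--     for result in h2h_results[:5]:  # 只看最近5场
--         if result.get("winner") == "home":
--             wins["home"] += 1
--         elif result.get("winner") == "draw":
--             wins["draw"] += 1
--         else:
--             wins["away"] += 1
--
--     return f"近5次交锋，主队{wins['home']}胜{wins['draw']}平{wins['away']}负。"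
-- ===== SOURCE B (Python) =====
-- def _summarize_h2h(h2h_results):
--     """总结历史交锋 — recursive tally of the first-5 slice, combining on the way back out."""
--     if not h2h_results:
--         return "双方近期无交锋记录。"
--
--     def tally(rs):
--         if not rs:
--             return (0, 0, 0)
--         h, d, a = tally(rs[1:])
--         w = rs[0].get("winner")
--         return (h + (w == "home"), d + (w == "draw"),
--                 a + (w != "home" and w != "draw"))
--
--     h, d, a = tally(h2h_results[:5])
--     return f"近5次交锋，主队{h}胜{d}平{a}负。"
-- ===== Notes on version B (the rewrite author's own statement) =====
-- stated objective: alternative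
-- what changed: Replaces A's forward loop that mutates a counts dict via an if/elif/else chain with a recursive function over the first-5 slice that returns a (home,draw,away) triple, classifying each record by boolean arithmetic and combining with the tail's counts on the way back out (back-to-front).
import Mathlib
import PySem

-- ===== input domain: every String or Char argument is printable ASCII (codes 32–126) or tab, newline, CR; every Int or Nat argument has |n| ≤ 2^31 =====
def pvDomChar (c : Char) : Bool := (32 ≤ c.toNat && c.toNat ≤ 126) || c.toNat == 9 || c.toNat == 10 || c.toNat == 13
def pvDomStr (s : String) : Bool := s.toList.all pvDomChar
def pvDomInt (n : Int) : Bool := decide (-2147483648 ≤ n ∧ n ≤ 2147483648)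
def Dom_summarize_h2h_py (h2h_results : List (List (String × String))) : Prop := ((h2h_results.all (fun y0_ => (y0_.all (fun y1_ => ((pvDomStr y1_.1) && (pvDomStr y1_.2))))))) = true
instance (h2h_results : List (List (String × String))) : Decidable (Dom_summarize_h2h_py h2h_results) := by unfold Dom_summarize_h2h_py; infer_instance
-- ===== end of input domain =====

-- B replaces A's forward loop over a mutable counts dict (if/elif/else) with a recursive
-- back-to-front tally returning a (home,draw,away) triple via boolean arithmetic (objective: alternative).

-- ===== PORT A =====
-- A's wins dict {"home","draw","away"} is carried as the triple (home, draw, away); the if/elif/else chain is kept in order.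
def summarize_h2h_py (h2h_results : List (List (String × String))) : String :=
  if h2h_results = [] then "双方近期无交锋记录。"
  else
    let wins : Int × Int × Int :=
      (PySem.List.slice h2h_results none (some 5)).foldl
        (fun w result =>
          if (PySem.Dict.mk result).get? "winner" = some "home" then (w.1 + 1, w.2.1, w.2.2)
          else if (PySem.Dict.mk result).get? "winner" = some "draw" then (w.1, w.2.1 + 1, w.2.2)
          else (w.1, w.2.1, w.2.2 + 1))
        (0, 0, 0)
    "近5次交锋，主队" ++ PySem.Int.toStr wins.1 ++ "胜" ++ PySem.Int.toStr wins.2.1 ++ "平" ++ PySem.Int.toStr wins.2.2 ++ "负。"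

-- ===== PORT B =====
-- Source B's inner recursive `tally`: head classified by boolean arithmetic, combined with the tail's counts.
def pvTallyB : List (List (String × String)) → Int × Int × Int
  | [] => (0, 0, 0)
  | r :: rs =>
    let t := pvTallyB rs
    let w := (PySem.Dict.mk r).get? "winner"
    (t.1 + (if w = some "home" then 1 else 0),
     t.2.1 + (if w = some "draw" then 1 else 0),
     t.2.2 + (if w ≠ some "home" ∧ w ≠ some "draw" then 1 else 0))

def summarize_h2h_py_alt (h2h_results : List (List (String × String))) : String :=
  if h2h_results = [] then "双方近期无交锋记录。"
  else
    let t := pvTallyB (PySem.List.slice h2h_results none (some 5))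
    "近5次交锋，主队" ++ PySem.Int.toStr t.1 ++ "胜" ++ PySem.Int.toStr t.2.1 ++ "平" ++ PySem.Int.toStr t.2.2 ++ "负。"

-- ===== PRECONDITION & SPEC =====
def Spec_summarize_h2h_py (h2h_results : List (List (String × String))) (out : String) : Prop := out = summarize_h2h_py_alt h2h_results
instance (h2h_results : List (List (String × String))) (out : String) : Decidable (Spec_summarize_h2h_py h2h_results out) := by unfold Spec_summarize_h2h_py; infer_instance

-- ===== CLAIM (what is proved, stated in full; the proofs are below) =====
def Claim_equal_summarize_h2h_py : Prop := ∀ (h2h_results : List (List (String × String))), Dom_summarize_h2h_py h2h_results → Spec_summarize_h2h_py h2h_results (summarize_h2h_py h2h_results)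

-- ===== LEMMAS AND PROOFS =====

theorem pv_foldl_eq_tally (l : List (List (String × String))) (h d a : Int) :
    l.foldl
      (fun (w : Int × Int × Int) result =>
        if (PySem.Dict.mk result).get? "winner" = some "home" then (w.1 + 1, w.2.1, w.2.2)
        else if (PySem.Dict.mk result).get? "winner" = some "draw" then (w.1, w.2.1 + 1, w.2.2)
        else (w.1, w.2.1, w.2.2 + 1))
      (h, d, a)
    = (h + (pvTallyB l).1, d + (pvTallyB l).2.1, a + (pvTallyB l).2.2) := by
  induction l generalizing h d a with
  | nil => simp [pvTallyB]
  | cons x xs ih =>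
    simp only [List.foldl_cons, pvTallyB]
    by_cases hH : (PySem.Dict.mk x).get? "winner" = some "home" <;>
      by_cases hD : (PySem.Dict.mk x).get? "winner" = some "draw" <;>
      simp [hH, hD, ih, Prod.ext_iff] <;> omega

-- ===== VERDICT (by name: the statement is the Claim_ definition above) =====
theorem summarize_h2h_py_spec : Claim_equal_summarize_h2h_py := by
  intro h2h _
  unfold Spec_summarize_h2h_py summarize_h2h_py summarize_h2h_py_alt
  by_cases he : h2h = []
  · simp [he]
  · simp only [he, if_false]
    rw [pv_foldl_eq_tally]
    simp
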